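-- pv_equiv track=rewrite | github.com/SwierkKlaudia/python | basics/others.py | I8
-- ===== SOURCE A (Python) =====
-- def I8(str1):
--     new_str = ''
--     new_lst = []
--     lst_str = str1.split(' ')
--     for i in lst_str:
--         if i != '':
--             new_lst.append(i)
--     new_str = ' '.join(new_lst)
--     return new_str
-- ===== SOURCE B (Python) =====
-- def I8(str1):
--     # single left-to-right pass with a pending-space flag; no split/join of tokens
--     out = []
--     pending = False
--     for ch in str1:
--         if ch == ' ':
--             if out:
--                 pending = True
--         else:
--             if pending:
--                 out.append(' ')
--                 pending = False
--             out.append(ch)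
--     return ''.join(out)
-- ===== Notes on version B (the rewrite author's own statement) =====
-- stated objective: alternative
-- what changed: Replaced A's split/filter/join over an intermediate token list by a single character-by-character pass that emits characters directly, using a pending-space flag to collapse space runs and suppress leading/trailing spaces.
import Mathlib
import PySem

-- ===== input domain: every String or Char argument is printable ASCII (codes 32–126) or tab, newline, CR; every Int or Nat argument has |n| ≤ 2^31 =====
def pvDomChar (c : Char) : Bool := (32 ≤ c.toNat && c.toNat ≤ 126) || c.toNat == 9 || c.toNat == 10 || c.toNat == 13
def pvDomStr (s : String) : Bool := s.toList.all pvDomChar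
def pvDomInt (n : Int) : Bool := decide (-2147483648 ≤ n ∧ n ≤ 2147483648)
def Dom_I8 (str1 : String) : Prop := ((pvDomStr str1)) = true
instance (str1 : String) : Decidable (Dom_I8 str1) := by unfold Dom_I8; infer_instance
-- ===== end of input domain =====

-- B replaces A's split/filter/join over a token list with one direct character pass
-- using a pending-space flag (objective: alternative decomposition, same O(n) cost).

-- ===== PORT A =====
-- str1.split(' '): " " ≠ "", so PySem.Str.split? returns some; getD [] is never the default.
def I8 (str1 : String) : String :=
  let lst_str := (PySem.Str.split? str1 " ").getD []
  let new_lst := lst_str.foldl (fun acc i => if i ≠ "" then acc ++ [i] else acc) ([] : List String)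
  PySem.Str.join " " new_lst

-- ===== PORT B =====
def I8_alt (str1 : String) : String :=
  let st := str1.toList.foldl
    (fun (st : List Char × Bool) ch =>
      if ch = ' ' then
        (st.1, if st.1 ≠ [] then true else st.2)
      else
        ((if st.2 then st.1 ++ [' '] else st.1) ++ [ch], false))
    (([] : List Char), false)
  String.ofList st.1

-- ===== PRECONDITION & SPEC =====
def Spec_I8 (str1 : String) (out : String) : Prop := out = I8_alt str1
instance (str1 : String) (out : String) : Decidable (Spec_I8 str1 out) := by unfold Spec_I8; infer_instance

-- ===== CLAIM (what is proved, stated in full; the proofs are below) =====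
def Claim_equal_I8 : Prop := ∀ (str1 : String), Dom_I8 str1 → Spec_I8 str1 (I8 str1)

-- ===== LEMMAS AND PROOFS =====

-- token decomposition performed by splitOn on a single-char separator
def pvPieces : List Char → List Char → List (List Char)
  | [], cur => [cur.reverse]
  | c :: rest, cur => if c = ' ' then cur.reverse :: pvPieces rest [] else pvPieces rest (c :: cur)

-- the collapsed output of the remaining characters, given whether any char was
-- already emitted (started) and whether a separating space is pending
def pvC : List Char → Bool → Bool → List Char
  | [], _, _ => []
  | c :: rest, started, pending =>
    if c = ' ' then pvC rest started (pending || started)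
    else (if pending then [' '] else []) ++ c :: pvC rest true false

theorem pvGo_eq (l : List Char) : ∀ (fuel : Nat) (cur : List Char) (acc : List (List Char)),
    l.length < fuel →
    PySem.Chars.splitOn.go [' '] fuel l cur acc = acc.reverse ++ pvPieces l cur := by
  induction l with
  | nil =>
    intro fuel cur acc h
    match fuel, h with
    | fuel + 1, _ => rw [PySem.Chars.splitOn.go.eq_def]; simp [pvPieces]
  | cons c rest ih =>
    intro fuel cur acc h
    match fuel, h with
    | fuel + 1, h =>
      rw [PySem.Chars.splitOn.go.eq_def]
      simp only [List.isPrefixOf, List.length_cons] at *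
      by_cases hc : c = ' '
      · subst hc
        simp only [if_pos, pvPieces, List.length_nil, List.drop_succ_cons, List.drop_zero]
        rw [ih fuel [] (cur.reverse :: acc) (by omega)]
        simp
      · rw [if_neg (by simp; intro h'; exact hc h'.symm), ih fuel (c :: cur) acc (by omega)]
        simp only [pvPieces, if_neg hc]

theorem pvSplitOn_eq (cs : List Char) :
    PySem.Chars.splitOn cs [' '] = pvPieces cs [] := by
  rw [PySem.Chars.splitOn, pvGo_eq cs (cs.length + 1) [] [] (by omega)]
  rfl

-- pending-with-started equals a conditional leading space
theorem pvC_true_true (rest : List Char) :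
    pvC rest true true = if pvC rest false false = [] then [] else ' ' :: pvC rest false false := by
  induction rest with
  | nil => simp [pvC]
  | cons c rest ih =>
    by_cases hc : c = ' '
    · subst hc; simpa [pvC] using ih
    · simp [pvC, hc]

-- a join whose first token is nonempty is nonempty
theorem pvJoin_ne_nil (p : List Char) (ps : List (List Char)) (hp : p ≠ []) :
    PySem.Chars.join [' '] (p :: ps) ≠ [] := by
  cases ps with
  | nil => rw [PySem.Chars.join_singleton]; exact hp
  | cons q r =>
    rw [PySem.Chars.join_cons_cons]
    cases p with
    | nil => exact absurd rfl hp
    | cons a as => simp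

-- main A-side characterization: join of the filtered token list is the collapse pvC
theorem pvA_eq (rest : List Char) : ∀ (cur : List Char),
    PySem.Chars.join [' '] ((pvPieces rest cur).filter (· ≠ [])) =
      cur.reverse ++ pvC rest (!cur.isEmpty) false := by
  induction rest with
  | nil =>
    intro cur
    cases cur with
    | nil => simp [pvPieces, pvC, PySem.Chars.join_nil]
    | cons a as => simp [pvPieces, pvC, PySem.Chars.join_singleton]
  | cons c rest ih =>
    intro cur
    by_cases hc : c = ' '
    · subst hc
      cases cur with
      | nil => simpa [pvPieces, pvC] using ih []
      | cons a as =>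
        rw [show pvPieces (' ' :: rest) (a :: as) = (a :: as).reverse :: pvPieces rest [] from by
              simp [pvPieces],
            show pvC (' ' :: rest) (!(a :: as).isEmpty) false = pvC rest true true from by
              simp [pvC]]
        rw [List.filter_cons_of_pos (by simp), pvC_true_true]
        rcases hps : (pvPieces rest []).filter (· ≠ []) with _ | ⟨p, ps⟩
        · have h0 : pvC rest false false = [] := by
            have h := ih []
            rw [hps, PySem.Chars.join_nil] at h
            simpa using h.symm
          rw [h0, if_pos rfl, PySem.Chars.join_singleton]
          simp
        · have hjoin : PySem.Chars.join [' '] (p :: ps) = pvC rest false false := by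
            have h := ih []; rw [hps] at h; simpa using h
          have hp : p ≠ [] := by
            have hm : p ∈ (pvPieces rest []).filter (· ≠ []) := by rw [hps]; simp
            simpa using (List.mem_filter.mp hm).2
          have hnz : pvC rest false false ≠ [] := hjoin ▸ pvJoin_ne_nil p ps hp
          rw [if_neg hnz, PySem.Chars.join_cons_cons, hjoin]
          simp
    · simp only [pvPieces, pvC, if_neg hc]
      rw [ih (c :: cur)]
      simp

-- B-side characterization: the fold from any state appends the collapse of the rest
theorem pvB_eq (rest : List Char) : ∀ (out : List Char) (pending : Bool),
    (rest.foldl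
      (fun (st : List Char × Bool) ch =>
        if ch = ' ' then (st.1, if st.1 ≠ [] then true else st.2)
        else ((if st.2 then st.1 ++ [' '] else st.1) ++ [ch], false))
      (out, pending)).1 = out ++ pvC rest (!out.isEmpty) pending := by
  induction rest with
  | nil => intro out pending; simp [pvC]
  | cons c rest ih =>
    intro out pending
    by_cases hc : c = ' '
    · subst hc
      simp only [List.foldl_cons, pvC]
      rw [ih]
      cases out with
      | nil => simp
      | cons a as => simp
    · simp only [List.foldl_cons, pvC, if_neg hc]
      rw [ih]
      cases pending <;> cases out <;> simp

-- ===== VERDICT (by name: the statement is the Claim_ definition above) =====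
theorem I8_spec : Claim_equal_I8 := by
  intro str1 _
  unfold Spec_I8 I8 I8_alt
  simp only []
  rw [← String.toList_inj]
  have hsep : (" " : String).toList = [' '] := by decide
  have hsplit : PySem.Str.split? str1 " " =
      some ((PySem.Chars.splitOn str1.toList [' ']).map String.ofList) := by
    simp [PySem.Str.split?, PySem.Chars.split?, hsep]
  rw [hsplit]
  simp only [Option.getD_some]
  rw [PySem.List.foldl_append_ite_eq_filter (fun i => i ≠ "") _ []]
  rw [List.nil_append, PySem.Str.toList_join, hsep]
  have hiff : ∀ cs : List Char, (String.ofList cs = "") ↔ cs = [] := by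
    intro cs
    rw [← String.toList_inj, String.toList_ofList]
    exact Iff.rfl
  have hfilter :
      (((PySem.Chars.splitOn str1.toList [' ']).map String.ofList).filter
          (fun i => decide (i ≠ ""))).map String.toList =
        (PySem.Chars.splitOn str1.toList [' ']).filter (· ≠ []) := by
    rw [List.filter_map, List.map_map]
    have h1 : ((fun i => decide (i ≠ "")) ∘ String.ofList) = fun cs : List Char => decide (cs ≠ []) := by
      funext cs
      exact decide_eq_decide.mpr (not_congr (hiff cs))
    have h2 : (String.toList ∘ String.ofList) = (id : List Char → List Char) := by
      funext cs; simp [Function.comp]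
    rw [h1, h2, List.map_id]
  rw [hfilter, pvSplitOn_eq, pvA_eq, pvB_eq, String.toList_ofList]
  simp
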